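-- pv_equiv track=rewrite | github.com/IndianaBug/fastmoonStreams | producers/ijsonm.py | split_json_into_chunks
-- ===== SOURCE A (Python) =====
-- def split_json_into_chunks(json_string, chunk_size):
--     chunks = []
--     start = 0
--     while start < len(json_string):
--         end = min(start + chunk_size, len(json_string))
--         while end > start and json_string[end - 1] != '}':
--             end -= 1
--         if end == start:
--             end = len(json_string)
--         chunks.append(json_string[start:end])
--         start = end
--     return chunks
-- ===== SOURCE B (Python) =====
-- def split_json_into_chunks(json_string, chunk_size):
--     n = len(json_string)
--     braces = [i for i, ch in enumerate(json_string) if ch == '}']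
--     chunks = []
--     start = 0
--     j = 0
--     while start < n:
--         window = min(start + chunk_size, n)
--         while j < len(braces) and braces[j] < start:
--             j += 1
--         k = j
--         while k < len(braces) and braces[k] < window:
--             k += 1
--         end = braces[k - 1] + 1 if k > j else n
--         chunks.append(json_string[start:end])
--         start = end
--         j = k
--     return chunks
-- ===== Notes on version B (the rewrite author's own statement) =====
-- stated objective: alternative
-- what changed: B precomputes the sorted list of all '}' positions once and picks each chunk's end with two monotone pointers into that list, instead of A's backward character-by-character scan inside every chunk window.
import Mathlib
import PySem

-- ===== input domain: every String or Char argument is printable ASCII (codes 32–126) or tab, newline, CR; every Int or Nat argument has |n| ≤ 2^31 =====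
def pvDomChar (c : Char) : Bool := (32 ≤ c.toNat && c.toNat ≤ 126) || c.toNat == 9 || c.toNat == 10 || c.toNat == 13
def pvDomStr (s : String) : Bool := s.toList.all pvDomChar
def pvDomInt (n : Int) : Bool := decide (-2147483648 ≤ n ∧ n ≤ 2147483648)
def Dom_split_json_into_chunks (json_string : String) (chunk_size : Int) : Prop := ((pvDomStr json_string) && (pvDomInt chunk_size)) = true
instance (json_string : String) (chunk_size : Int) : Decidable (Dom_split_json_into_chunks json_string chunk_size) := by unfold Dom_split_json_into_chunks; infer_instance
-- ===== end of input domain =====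

-- B replaces A's per-chunk backward character scan by a once-built sorted list of '}' positions
-- consumed with two monotone pointers (objective: alternative decomposition).

-- ===== PORT A =====

-- inner `while end > start and json_string[end-1] != '}'` loop (index end-1 is always in range here)
def pvInnerA (cs : List Char) (start e : Nat) : Nat :=
  if _h : start < e then
    if cs.getD (e - 1) ' ' = '}' then e else pvInnerA cs start (e - 1)
  else e
termination_by e

-- one iteration of A's outer loop body: `end = min(...)`, the inner scan, `if end == start: end = len`
def pvEndA (cs : List Char) (csz : Int) (start : Nat) : Nat :=
  let e1 := pvInnerA cs start ((min ((start : Int) + csz) ((cs.length : Int))).toNat)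
  if e1 = start then cs.length else e1

-- outer `while start < len` loop of A; the `else []` branch is a totality guard only:
-- for chunk_size < 0 (outside Pre_) the Python loop never terminates.
def pvOuterA (cs : List Char) (csz : Int) (start : Nat) : List String :=
  if _h : start < cs.length then
    if _h2 : start < pvEndA cs csz start then
      String.ofList ((cs.drop start).take (pvEndA cs csz start - start)) :: pvOuterA cs csz (pvEndA cs csz start)
    else []
  else []
termination_by cs.length - start
decreasing_by omega

def split_json_into_chunks (json_string : String) (chunk_size : Int) : List String :=
  pvOuterA json_string.toList chunk_size 0

-- ===== PORT B =====

-- `[i for i, ch in enumerate(json_string) if ch == '}']`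
def pvBraces (cs : List Char) : List Nat :=
  (List.range cs.length).filter (fun i => cs.getD i ' ' = '}')

-- `while k < len(braces) and braces[k] < b: k += 1`
def pvAdv (P : List Nat) (b k : Nat) : Nat :=
  if h : k < P.length then
    if P[k] < b then pvAdv P b (k + 1) else k
  else k
termination_by P.length - k

-- one iteration of B's loop body: returns (end, new pointer k)
def pvStepB (cs : List Char) (csz : Int) (P : List Nat) (start j : Nat) : Nat × Nat :=
  let window := (min ((start : Int) + csz) ((cs.length : Int))).toNat
  let j' := pvAdv P start j
  let k := pvAdv P window j'
  (if j' < k then P.getD (k - 1) 0 + 1 else cs.length, k)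

-- outer loop of B; the `else []` branch is the same totality guard as in A's port.
def pvOuterB (cs : List Char) (csz : Int) (P : List Nat) (start j : Nat) : List String :=
  if _h : start < cs.length then
    if _h2 : start < (pvStepB cs csz P start j).1 then
      String.ofList ((cs.drop start).take ((pvStepB cs csz P start j).1 - start)) ::
        pvOuterB cs csz P (pvStepB cs csz P start j).1 (pvStepB cs csz P start j).2
    else []
  else []
termination_by cs.length - start
decreasing_by omega

def split_json_into_chunks_alt (json_string : String) (chunk_size : Int) : List String :=
  pvOuterB json_string.toList chunk_size (pvBraces json_string.toList) 0 0

-- ===== PRECONDITION & SPEC =====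
-- Pre_ excludes chunk_size < 0 on a non-empty string: there the Python A loops forever
-- (start drifts towards -∞) and never returns.
def Pre_split_json_into_chunks (json_string : String) (chunk_size : Int) : Prop :=
  0 ≤ chunk_size ∨ json_string = ""
instance (json_string : String) (chunk_size : Int) : Decidable (Pre_split_json_into_chunks json_string chunk_size) := by unfold Pre_split_json_into_chunks; infer_instance

def pvWitness_split_json_into_chunks : String × Int := ("{\"a\":1}{\"b\":22}", 9)

def Spec_split_json_into_chunks (json_string : String) (chunk_size : Int) (out : List String) : Prop := out = split_json_into_chunks_alt json_string chunk_size
instance (json_string : String) (chunk_size : Int) (out : List String) : Decidable (Spec_split_json_into_chunks json_string chunk_size out) := by unfold Spec_split_json_into_chunks; infer_instance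

-- ===== CLAIM (what is proved, stated in full; the proofs are below) =====
def Claim_equal_split_json_into_chunks : Prop := ∀ (json_string : String) (chunk_size : Int), Dom_split_json_into_chunks json_string chunk_size → Pre_split_json_into_chunks json_string chunk_size → Spec_split_json_into_chunks json_string chunk_size (split_json_into_chunks json_string chunk_size)

-- ===== LEMMAS AND PROOFS =====

-- number of brace positions strictly below b
def pvIdx (P : List Nat) (b : Nat) : Nat := P.countP (fun i => i < b)

theorem pvIdx_le_length (P : List Nat) (b : Nat) : pvIdx P b ≤ P.length :=
  List.countP_le_length

theorem pvIdx_mono (P : List Nat) {b b' : Nat} (h : b ≤ b') : pvIdx P b ≤ pvIdx P b' := by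
  apply List.countP_mono_left
  intro x _ hx
  simp at hx ⊢; omega

theorem pvBraces_sorted (cs : List Char) : (pvBraces cs).Pairwise (· < ·) :=
  List.Pairwise.filter _ (List.pairwise_lt_range)

theorem pvBraces_mem (cs : List Char) (i : Nat) :
    i ∈ pvBraces cs ↔ i < cs.length ∧ cs.getD i ' ' = '}' := by
  simp [pvBraces, List.mem_filter]

-- in a strictly sorted list, the elements < b are exactly the first pvIdx P b entries
theorem pv_lt_iff_lt_idx {P : List Nat} (hs : P.Pairwise (· < ·)) (b : Nat) :
    ∀ i (h : i < P.length), (P[i] < b ↔ i < pvIdx P b) := by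
  induction P with
  | nil => intro i h; simp at h
  | cons p ps ih =>
    rcases List.pairwise_cons.mp hs with ⟨hp, hps⟩
    intro i h
    have hcnt : pvIdx (p :: ps) b = pvIdx ps b + (if p < b then 1 else 0) := by
      simp [pvIdx, List.countP_cons]
    by_cases hpb : p < b
    · cases i with
      | zero =>
        simp only [List.getElem_cons_zero, hcnt, if_pos hpb]
        omega
      | succ i =>
        have h' : i < ps.length := by simpa using h
        have hiff := ih hps i h'
        simp only [List.getElem_cons_succ, hcnt, if_pos hpb]
        omega
    · have hzero : pvIdx ps b = 0 := by
        rw [pvIdx, List.countP_eq_zero]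
        intro q hq
        have := hp q hq
        simp; omega
      cases i with
      | zero =>
        simp only [List.getElem_cons_zero, hcnt, if_neg hpb, hzero]
        omega
      | succ i =>
        have h' : i < ps.length := by simpa using h
        have hq := hp _ (List.getElem_mem h')
        simp only [List.getElem_cons_succ, hcnt, if_neg hpb, hzero]
        omega

theorem pvAdv_eq {P : List Nat} (hs : P.Pairwise (· < ·)) (b : Nat) :
    ∀ m j, P.length - j ≤ m → j ≤ P.length → (∀ i (h : i < P.length), i < j → P[i] < b) →
      pvAdv P b j = pvIdx P b := by
  intro m
  induction m with
  | zero =>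
    intro j hm hj hall
    have hjlen : j = P.length := by omega
    have hle : pvIdx P b ≤ P.length := pvIdx_le_length P b
    rw [pvAdv]
    simp only [dif_neg (by omega : ¬ j < P.length)]
    rcases Nat.eq_zero_or_pos P.length with h0 | hpos
    · omega
    · have := (pv_lt_iff_lt_idx hs b (P.length - 1) (by omega)).mp
        (hall (P.length - 1) (by omega) (by omega))
      omega
  | succ m ih =>
    intro j hm hj hall
    by_cases hjl : j < P.length
    · rw [pvAdv]
      simp only [dif_pos hjl]
      by_cases hlt : P[j] < b
      · simp only [if_pos hlt]
        apply ih (j + 1) (by omega) (by omega)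
        intro i hi hii
        rcases Nat.lt_or_ge i j with h' | h'
        · exact hall i hi h'
        · have : i = j := by omega
          subst this; exact hlt
      · simp only [if_neg hlt]
        have h1 : ¬ j < pvIdx P b := fun hc => hlt ((pv_lt_iff_lt_idx hs b j hjl).mpr hc)
        have h2 : j ≤ pvIdx P b := by
          rcases Nat.eq_zero_or_pos j with h0 | hpos
          · omega
          · have := (pv_lt_iff_lt_idx hs b (j - 1) (by omega)).mp
              (hall (j - 1) (by omega) (by omega))
            omega
        omega
    · exact ih j (by omega) hj hall

-- the backward scan of A, characterised through pvIdx over the brace-position list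
theorem pvInnerA_eq (cs : List Char) (start : Nat) :
    ∀ w, start ≤ w → w ≤ cs.length →
      pvInnerA cs start w =
        if pvIdx (pvBraces cs) start < pvIdx (pvBraces cs) w
        then (pvBraces cs).getD (pvIdx (pvBraces cs) w - 1) 0 + 1
        else start := by
  have hs := pvBraces_sorted cs
  intro w
  induction w with
  | zero =>
    intro h1 h2
    have : start = 0 := by omega
    subst this
    rw [pvInnerA]; simp
  | succ w ihw =>
    intro h1 h2
    set P := pvBraces cs with hP
    rw [pvInnerA]
    by_cases hsw : start < w + 1
    · simp only [dif_pos hsw, Nat.add_sub_cancel]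
      by_cases hbr : cs.getD w ' ' = '}'
      · -- w is a brace position: result w+1
        simp only [if_pos hbr]
        have hmem : w ∈ P := (pvBraces_mem cs w).mpr ⟨by omega, hbr⟩
        rcases List.getElem_of_mem hmem with ⟨i, hi, hPi⟩
        have hilt : i < pvIdx P (w + 1) :=
          (pv_lt_iff_lt_idx hs (w + 1) i hi).mp (by omega)
        have hige : ¬ i < pvIdx P w := by
          intro hc
          have := (pv_lt_iff_lt_idx hs w i hi).mpr hc
          omega
        have hieq : i = pvIdx P (w + 1) - 1 := by
          by_contra hne
          have hi1 : i + 1 < pvIdx P (w + 1) := by omega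
          have hlen : i + 1 < P.length := by
            have := pvIdx_le_length P (w + 1); omega
          have hlt1 : P[i + 1] < w + 1 := (pv_lt_iff_lt_idx hs (w + 1) (i + 1) hlen).mpr hi1
          have hgt : P[i] < P[i + 1] :=
            (List.pairwise_iff_getElem.mp hs) i (i + 1) hi hlen (by omega)
          omega
        have hmono : pvIdx P start ≤ pvIdx P w := pvIdx_mono P (by omega)
        have hcond : pvIdx P start < pvIdx P (w + 1) := by omega
        rw [if_pos hcond, ← hieq, List.getD_eq_getElem P 0 hi, hPi]
      · -- w not a brace: pvIdx (w+1) = pvIdx w, recurse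
        simp only [if_neg hbr]
        have heq : pvIdx P (w + 1) = pvIdx P w := by
          have hle : pvIdx P w ≤ pvIdx P (w + 1) := pvIdx_mono P (by omega)
          by_contra hne
          have hlt : pvIdx P w < pvIdx P (w + 1) := by omega
          have hlen : pvIdx P w < P.length := by
            have := pvIdx_le_length P (w + 1); omega
          have hlt1 : P[pvIdx P w] < w + 1 :=
            (pv_lt_iff_lt_idx hs (w + 1) _ hlen).mpr hlt
          have hge1 : ¬ P[pvIdx P w] < w := by
            intro hc
            have := (pv_lt_iff_lt_idx hs w _ hlen).mp hc
            omega
          have hweq : P[pvIdx P w] = w := by omega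
          have hmem : w ∈ P := hweq ▸ List.getElem_mem hlen
          rw [hP, pvBraces_mem] at hmem
          exact hbr hmem.2
        rw [heq]
        exact ihw (by omega) (by omega)
    · have : start = w + 1 := by omega
      subst this
      simp

-- main loop equivalence, by induction on the remaining length
theorem pvOuter_eq (cs : List Char) (csz : Int) (hcsz : 0 ≤ csz) :
    ∀ m start j, cs.length - start ≤ m → j ≤ (pvBraces cs).length →
      (∀ i (h : i < (pvBraces cs).length), i < j → (pvBraces cs)[i] < start) →
      pvOuterA cs csz start = pvOuterB cs csz (pvBraces cs) start j := by
  have hs := pvBraces_sorted cs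
  intro m
  induction m with
  | zero =>
    intro start j hm hj hall
    rw [pvOuterA, pvOuterB]
    simp [show ¬ start < cs.length by omega]
  | succ m ih =>
    intro start j hm hj hall
    set P := pvBraces cs with hP
    by_cases h : start < cs.length
    · have hsw : start ≤ ((min ((start : Int) + csz) ((cs.length : Int))).toNat) := by omega
      have hwn : ((min ((start : Int) + csz) ((cs.length : Int))).toNat) ≤ cs.length := by omega
      set w := (min ((start : Int) + csz) ((cs.length : Int))).toNat with hw
      have hj' : pvAdv P start j = pvIdx P start :=
        pvAdv_eq hs start (P.length - j) j le_rfl hj hall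
      have hallj' : ∀ i (hi : i < P.length), i < pvIdx P start → P[i] < start := by
        intro i hi hilt
        exact (pv_lt_iff_lt_idx hs start i hi).mpr hilt
      have hk : pvAdv P w (pvIdx P start) = pvIdx P w := by
        apply pvAdv_eq hs w (P.length - pvIdx P start) _ le_rfl (pvIdx_le_length P start)
        intro i hi hilt
        have := hallj' i hi hilt
        omega
      have hstep : pvStepB cs csz P start j =
          (if pvIdx P start < pvIdx P w then P.getD (pvIdx P w - 1) 0 + 1 else cs.length,
           pvIdx P w) := by
        simp only [pvStepB, ← hw, hj', hk]
      have hinner := pvInnerA_eq cs start w hsw hwn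
      rw [← hP] at hinner
      by_cases hbr : pvIdx P start < pvIdx P w
      · -- a brace exists in [start, w)
        have hlen1 : pvIdx P w - 1 < P.length := by
          have := pvIdx_le_length P w; omega
        have hge : start ≤ P[pvIdx P w - 1] := by
          by_contra hc
          have := (pv_lt_iff_lt_idx hs start _ hlen1).mp (by omega)
          omega
        have hgetD : P.getD (pvIdx P w - 1) 0 = P[pvIdx P w - 1] :=
          List.getD_eq_getElem P 0 hlen1
        have hendA : pvEndA cs csz start = P[pvIdx P w - 1] + 1 := by
          rw [pvEndA]
          simp only [← hw]
          rw [hinner, if_pos hbr, hgetD]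
          rw [if_neg (by omega)]
        have hstep1 : (pvStepB cs csz P start j).1 = P[pvIdx P w - 1] + 1 := by
          rw [hstep]; simp only [if_pos hbr, hgetD]
        have hstep2 : (pvStepB cs csz P start j).2 = pvIdx P w := by rw [hstep]
        have hlt : start < P[pvIdx P w - 1] + 1 := by omega
        rw [pvOuterA, pvOuterB]
        simp only [dif_pos h, hendA, hstep1, hstep2, dif_pos hlt]
        congr 1
        apply ih
        · omega
        · exact pvIdx_le_length P w
        · intro i hi hilt
          rcases Nat.lt_or_ge i (pvIdx P w - 1) with h' | h'
          · have := (List.pairwise_iff_getElem.mp hs) i _ hi hlen1 h'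
            omega
          · have : i = pvIdx P w - 1 := by omega
            subst this; omega
      · -- no brace in [start, w): both take the rest of the string
        have hendA : pvEndA cs csz start = cs.length := by
          rw [pvEndA]
          simp only [← hw]
          rw [hinner, if_neg hbr, if_pos rfl]
        have hstep1 : (pvStepB cs csz P start j).1 = cs.length := by
          rw [hstep]; simp only [if_neg hbr]
        have hstep2 : (pvStepB cs csz P start j).2 = pvIdx P w := by rw [hstep]
        rw [pvOuterA, pvOuterB]
        simp only [hendA, hstep1, hstep2, dif_pos h]
        congr 1
        apply ih
        · omega
        · exact pvIdx_le_length P w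
        · intro i hi hilt
          have hmem : P[i] ∈ pvBraces cs := by rw [← hP]; exact List.getElem_mem hi
          exact ((pvBraces_mem cs _).mp hmem).1
    · rw [pvOuterA, pvOuterB]
      simp [h]

-- ===== VERDICT (by name: the statement is the Claim_ definition above) =====
theorem split_json_into_chunks_spec : Claim_equal_split_json_into_chunks := by
  intro s csz _hdom hpre
  unfold Spec_split_json_into_chunks split_json_into_chunks split_json_into_chunks_alt
  rcases hpre with hcsz | hempty
  · exact pvOuter_eq s.toList csz hcsz s.toList.length 0 0 (by omega)
      (Nat.zero_le _) (by intro i _ hi; omega)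
  · subst hempty
    rw [pvOuterA, pvOuterB]; simp
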